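-- pv_equiv track=rewrite | github.com/sunmingtao/sample-code | python/projecteuler/p111.py | get_repeat_digit_candidate_list
-- ===== SOURCE A (Python) =====
-- def all_digits_minus_one_digit(digit):
--     return set('1234567890') - set(str(digit))
--
-- def get_repeat_digit_candidate_list(length, repeated_digits, test_length):
--     assert test_length < length
--     base_candidate_list = str(repeated_digits) * test_length
--     minus_repeated_digits_set = all_digits_minus_one_digit(repeated_digits)
--     non_repeated_digits_list = get_non_repeated_digits_list(minus_repeated_digits_set, length - test_length)
--     candidate_list = []
--     for non_repeated_digits in non_repeated_digits_list:
--         candidate_list.append(base_candidate_list + ''.join(non_repeated_digits))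
--     return candidate_list
--
-- def add_to_non_repeated_digits_list(digits_list, pickup_list):
--     new_pickup_list = []
--     if len(pickup_list) == 0:
--         for digit in digits_list:
--             new_pickup_list.append([digit])
--     else:
--         for pickup in pickup_list:
--             max_digit = max(pickup)
--             for index in range(digits_list.index(max_digit), len(digits_list)):
--                 pickup_copy = pickup.copy()
--                 pickup_copy.append(digits_list[index])
--                 new_pickup_list.append(pickup_copy)
--     return new_pickup_list
--
-- def get_non_repeated_digits_list(digits_set, n):
--     digits_list = list(digits_set)
--     digits_list.sort()
--     pickup_list = []
--     for i in range(n):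
--         pickup_list = add_to_non_repeated_digits_list(digits_list, pickup_list)
--     return pickup_list
-- ===== SOURCE B (Python) =====
-- def _cwr(digits, r):
--     # combinations with replacement of sorted digits, lexicographic order
--     if r <= 0:
--         return [[]]
--     if not digits:
--         return []
--     first = [[digits[0]] + rest for rest in _cwr(digits, r - 1)]
--     return first + _cwr(digits[1:], r)
--
-- def get_repeat_digit_candidate_list(length, repeated_digits, test_length):
--     assert test_length < length
--     base = str(repeated_digits) * test_length
--     digits = sorted(set('1234567890') - set(str(repeated_digits)))
--     return [base + ''.join(combo) for combo in _cwr(digits, length - test_length)]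
-- ===== Notes on version B (the rewrite author's own statement) =====
-- stated objective: simpler
-- what changed: Replaces the level-by-level list-copy accumulation (add/get helpers with max(), list.index() scans and explicit copies) by a single recursive combinations-with-replacement generator over the sorted digit list plus one comprehension.
import Mathlib
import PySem

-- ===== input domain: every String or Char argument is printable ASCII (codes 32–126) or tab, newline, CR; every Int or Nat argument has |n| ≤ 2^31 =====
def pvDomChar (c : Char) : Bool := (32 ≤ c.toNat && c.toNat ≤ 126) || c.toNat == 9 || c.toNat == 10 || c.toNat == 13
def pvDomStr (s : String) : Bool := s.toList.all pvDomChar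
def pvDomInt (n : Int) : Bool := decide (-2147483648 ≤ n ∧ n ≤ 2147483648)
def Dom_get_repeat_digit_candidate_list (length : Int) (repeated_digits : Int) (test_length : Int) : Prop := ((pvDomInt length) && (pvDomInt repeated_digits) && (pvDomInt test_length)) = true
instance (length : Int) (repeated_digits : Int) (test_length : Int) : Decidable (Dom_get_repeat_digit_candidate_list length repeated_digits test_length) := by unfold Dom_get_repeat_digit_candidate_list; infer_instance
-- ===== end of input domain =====

-- B replaces A's level-by-level list-copy accumulation by one recursive
-- combinations-with-replacement generator plus a comprehension (objective: simpler).


-- ===== PORT A =====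
-- all_digits_minus_one_digit(digit) = set('1234567890') - set(str(digit))
def pyA_all_digits_minus_one_digit (digit : Int) : PySem.Set Char :=
  PySem.Set.diff (PySem.Set.ofList ("1234567890".toList)) (PySem.Int.toChars digit)

-- add_to_non_repeated_digits_list(digits_list, pickup_list)
-- (max() on an empty pickup and .index() on a missing digit would raise in
-- Python; both are unreachable in A's pipeline, the port returns acc there)
def pyA_add_to_non_repeated_digits_list (digits_list : List Char)
    (pickup_list : List (List Char)) : List (List Char) :=
  if pickup_list.length == 0 then
    digits_list.foldl (fun acc d => acc ++ [[d]]) []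
  else
    pickup_list.foldl (fun acc pickup =>
      match PySem.List.max? pickup (fun x => x) with
      | none => acc
      | some max_digit =>
        match PySem.List.index? digits_list max_digit with
        | none => acc
        | some idx =>
          (PySem.List.pyRange (idx : Int) (digits_list.length : Int) 1).foldl
            (fun acc2 index => acc2 ++ [pickup ++ [PySem.List.pyGetD digits_list index ' ']]) acc) []

-- get_non_repeated_digits_list(digits_set, n)
def pyA_get_non_repeated_digits_list (digits_set : PySem.Set Char) (n : Int) : List (List Char) :=
  let digits_list := PySem.List.sorted digits_set (fun x => x) false
  (PySem.List.pyRange 0 n 1).foldl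
    (fun pickup_list _ => pyA_add_to_non_repeated_digits_list digits_list pickup_list) []

def get_repeat_digit_candidate_list (length : Int) (repeated_digits : Int) (test_length : Int) : List String :=
  -- str(repeated_digits) * test_length (a non-positive count gives the empty string)
  let base_candidate_list : List Char :=
    (List.replicate test_length.toNat (PySem.Int.toChars repeated_digits)).flatten
  let minus_repeated_digits_set := pyA_all_digits_minus_one_digit repeated_digits
  let non_repeated_digits_list :=
    pyA_get_non_repeated_digits_list minus_repeated_digits_set (length - test_length)
  non_repeated_digits_list.foldl
    (fun candidate_list non_repeated_digits =>
      candidate_list ++ [String.mk (base_candidate_list ++ non_repeated_digits)]) []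

-- ===== PORT B =====
-- _cwr(digits, r): recursive combinations-with-replacement, lexicographic
def pyB_cwr (digits : List Char) (r : Int) : List (List Char) :=
  if _h : r ≤ 0 then [[]]
  else
    match digits with
    | [] => []
    | d :: rest => (pyB_cwr digits (r - 1)).map (fun c => d :: c) ++ pyB_cwr rest r
termination_by (r.toNat, digits.length)
decreasing_by
  · left; omega
  · right; constructor

def get_repeat_digit_candidate_list_alt (length : Int) (repeated_digits : Int) (test_length : Int) : List String :=
  let base : List Char :=
    (List.replicate test_length.toNat (PySem.Int.toChars repeated_digits)).flatten
  let digits := PySem.List.sorted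
    (PySem.Set.diff (PySem.Set.ofList ("1234567890".toList)) (PySem.Int.toChars repeated_digits))
    (fun x => x) false
  (pyB_cwr digits (length - test_length)).map (fun combo => String.mk (base ++ combo))

-- ===== PRECONDITION & SPEC =====
-- A's assert raises AssertionError unless test_length < length; nothing else raises on reachable code.
def Pre_get_repeat_digit_candidate_list (length : Int) (repeated_digits : Int) (test_length : Int) : Prop :=
  test_length < length
instance (length : Int) (repeated_digits : Int) (test_length : Int) : Decidable (Pre_get_repeat_digit_candidate_list length repeated_digits test_length) := by unfold Pre_get_repeat_digit_candidate_list; infer_instance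
def pvWitness_get_repeat_digit_candidate_list : Int × Int × Int := (3, 7, 2)

def Spec_get_repeat_digit_candidate_list (length : Int) (repeated_digits : Int) (test_length : Int) (out : List String) : Prop := out = get_repeat_digit_candidate_list_alt length repeated_digits test_length
instance (length : Int) (repeated_digits : Int) (test_length : Int) (out : List String) : Decidable (Spec_get_repeat_digit_candidate_list length repeated_digits test_length out) := by unfold Spec_get_repeat_digit_candidate_list; infer_instance

-- ===== CLAIM (what is proved, stated in full; the proofs are below) =====
def Claim_equal_get_repeat_digit_candidate_list : Prop := ∀ (length : Int) (repeated_digits : Int) (test_length : Int), Dom_get_repeat_digit_candidate_list length repeated_digits test_length → Pre_get_repeat_digit_candidate_list length repeated_digits test_length → Spec_get_repeat_digit_candidate_list length repeated_digits test_length (get_repeat_digit_candidate_list length repeated_digits test_length)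

-- ===== LEMMAS AND PROOFS =====
-- the clean extension step: extend p with every digit ≥ its last one
def extF (L : List Char) (p : List Char) : List (List Char) :=
  (L.filter (fun d => match p.getLast? with | none => true | some m => decide (m ≤ d))).map
    (fun d => p ++ [d])

theorem pyB_cwr_nonpos (L : List Char) (r : Int) (h : r ≤ 0) : pyB_cwr L r = [[]] := by
  unfold pyB_cwr; simp [h]

theorem pyB_cwr_nil_pos (r : Int) (h : 0 < r) : pyB_cwr [] r = [] := by
  unfold pyB_cwr; simp [show ¬ r ≤ 0 by omega]

theorem pyB_cwr_cons_pos (d : Char) (rest : List Char) (r : Int) (h : 0 < r) :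
    pyB_cwr (d :: rest) r
      = (pyB_cwr (d :: rest) (r - 1)).map (fun c => d :: c) ++ pyB_cwr rest r := by
  conv_lhs => unfold pyB_cwr
  simp [show ¬ r ≤ 0 by omega]

theorem pyB_cwr_one (L : List Char) : pyB_cwr L 1 = L.map (fun d => [d]) := by
  induction L with
  | nil => simp [pyB_cwr_nil_pos]
  | cons d rest ih =>
      rw [pyB_cwr_cons_pos d rest 1 (by omega)]
      norm_num [pyB_cwr_nonpos, ih]

theorem mem_pyB_cwr_subset (L : List Char) (r : Int) :
    ∀ p ∈ pyB_cwr L r, ∀ d ∈ p, d ∈ L := by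
  induction L, r using pyB_cwr.induct with
  | case1 L r h => intro p hp; unfold pyB_cwr at hp; simp [h] at hp; simp [hp]
  | case2 r h => intro p hp; unfold pyB_cwr at hp; simp [h] at hp
  | case3 r h d rest ih1 ih2 =>
      intro p hp
      unfold pyB_cwr at hp
      simp only [dif_neg h] at hp
      rcases List.mem_append.1 hp with h1 | h2
      · obtain ⟨q, hq, rfl⟩ := List.mem_map.1 h1
        intro x hx
        rcases List.mem_cons.1 hx with rfl | hx
        · simp
        · exact ih1 q hq x hx
      · intro x hx; exact List.mem_cons_of_mem _ (ih2 p h2 x hx)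

theorem length_mem_pyB_cwr (L : List Char) (r : Int) :
    ∀ p ∈ pyB_cwr L r, p.length = r.toNat := by
  induction L, r using pyB_cwr.induct with
  | case1 L r h =>
      intro p hp; unfold pyB_cwr at hp; simp [h] at hp; simp [hp, Int.toNat_of_nonpos h]
  | case2 r h => intro p hp; unfold pyB_cwr at hp; simp [h] at hp
  | case3 r h d rest ih1 ih2 =>
      intro p hp
      unfold pyB_cwr at hp
      simp only [dif_neg h] at hp
      rcases List.mem_append.1 hp with h1 | h2
      · obtain ⟨q, hq, rfl⟩ := List.mem_map.1 h1
        have := ih1 q hq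
        simp [this]; omega
      · exact ih2 p h2

theorem extF_cons (L : List Char) (d : Char) (p : List Char)
    (hmin : ∀ x ∈ L, d ≤ x) : extF L (d :: p) = (extF L p).map (fun c => d :: c) := by
  cases p with
  | nil =>
      simp only [extF, List.getLast?_nil, List.getLast?_singleton]
      rw [List.filter_eq_self.2 (by intro a ha; simpa using hmin a ha),
          List.filter_eq_self.2 (by intro a _; rfl)]
      simp
  | cons y q =>
      have hlast : (d :: y :: q).getLast? = (y :: q).getLast? := by
        simp [List.getLast?_cons_cons]
      simp only [extF, hlast, List.map_map]
      rfl

theorem pyB_cwr_step (n : Nat) (L : List Char) (hL : L.Pairwise (· < ·)) :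
    pyB_cwr L ((n : Int) + 1) = (pyB_cwr L (n : Int)).flatMap (extF L) := by
  induction n generalizing L with
  | zero =>
      rw [show ((0:Nat):Int)+1 = 1 by norm_num, pyB_cwr_one,
          pyB_cwr_nonpos L ((0:Nat):Int) (by norm_num)]
      simp [extF]
  | succ n ihn =>
      induction L with
      | nil =>
          rw [pyB_cwr_nil_pos _ (by push_cast; omega), pyB_cwr_nil_pos _ (by push_cast; omega)]
          simp
      | cons d rest ihL =>
          have hd_lt : ∀ x ∈ rest, d < x := (List.pairwise_cons.1 hL).1
          have hrest : rest.Pairwise (· < ·) := (List.pairwise_cons.1 hL).2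
          have hmin : ∀ x ∈ d :: rest, d ≤ x := by
            intro x hx; rcases List.mem_cons.1 hx with rfl | hx
            · exact le_rfl
            · exact le_of_lt (hd_lt x hx)
          -- LHS
          have hstep : (((n+1:Nat)):Int) + 1 - 1 = ((n+1:Nat):Int) := by push_cast; ring
          rw [pyB_cwr_cons_pos d rest (((n+1:Nat):Int)+1) (by push_cast; omega), hstep]
          -- RHS: unfold one cwr level
          rw [pyB_cwr_cons_pos d rest ((n+1:Nat):Int) (by push_cast; omega),
              show ((n+1:Nat):Int) - 1 = (n:Int) by push_cast; ring]
          rw [List.flatMap_append]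
          -- first block
          have h1 : ((pyB_cwr (d :: rest) (n:Int)).map (fun c => d :: c)).flatMap (extF (d :: rest))
              = (pyB_cwr (d :: rest) ((n:Int)+1)).map (fun c => d :: c) := by
            rw [List.flatMap_map, ihn (d :: rest) hL, List.map_flatMap]
            exact List.flatMap_congr (fun p _ => extF_cons (d :: rest) d p hmin)
          -- second block
          have h2 : (pyB_cwr rest ((n+1:Nat):Int)).flatMap (extF (d :: rest))
              = pyB_cwr rest (((n+1:Nat):Int)+1) := by
            rw [ihL hrest]
            exact List.flatMap_congr (by
              intro p hp
              have hlen := length_mem_pyB_cwr rest ((n+1:Nat):Int) p hp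
              have hpne : p ≠ [] := by
                intro hnil; rw [hnil] at hlen; simp at hlen
              have hmlast : p.getLast? = some (p.getLast hpne) :=
                List.getLast?_eq_some_getLast hpne
              have hmem : p.getLast hpne ∈ rest :=
                mem_pyB_cwr_subset rest _ p hp _ (List.getLast_mem hpne)
              have hdm : ¬ (p.getLast hpne ≤ d) := not_le.2 (hd_lt _ hmem)
              unfold extF
              rw [hmlast]
              simp [hdm])
          rw [h1, h2]
          congr 1
          rw [pyB_cwr_cons_pos d rest ((n:Int)+1) (by omega),
              show (n:Int)+1-1 = (n:Int) by ring]
          push_cast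
          rfl

theorem pyB_cwr_ne_nil (L : List Char) (r : Int) (hne : L ≠ []) : pyB_cwr L r ≠ [] := by
  induction L, r using pyB_cwr.induct with
  | case1 L r h => unfold pyB_cwr; simp [h]
  | case2 r h => exact absurd rfl hne
  | case3 r h d rest ih1 ih2 =>
      unfold pyB_cwr
      simp only [dif_neg h]
      have := ih1 (by simp)
      intro hcon
      rcases List.append_eq_nil_iff.1 hcon with ⟨ha, _⟩
      exact this (List.map_eq_nil_iff.1 ha)

theorem pairwise_le_of_mem_pyB_cwr (L : List Char) (r : Int) (hL : L.Pairwise (· < ·)) :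
    ∀ p ∈ pyB_cwr L r, p.Pairwise (· ≤ ·) := by
  induction L, r using pyB_cwr.induct with
  | case1 L r h => intro p hp; rw [pyB_cwr_nonpos L r h] at hp; simp at hp; simp [hp]
  | case2 r h => intro p hp; rw [pyB_cwr_nil_pos r (by omega)] at hp; simp at hp
  | case3 r h d rest ih1 ih2 =>
      intro p hp
      rw [pyB_cwr_cons_pos d rest r (by omega)] at hp
      rcases List.mem_append.1 hp with h1 | h2
      · obtain ⟨q, hq, rfl⟩ := List.mem_map.1 h1
        refine List.pairwise_cons.2 ⟨?_, ih1 hL q hq⟩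
        intro x hx
        have hxL : x ∈ d :: rest := mem_pyB_cwr_subset _ _ q hq x hx
        rcases List.mem_cons.1 hxL with rfl | hxr
        · exact le_rfl
        · exact le_of_lt ((List.pairwise_cons.1 hL).1 x hxr)
      · exact ih2 (List.pairwise_cons.1 hL).2 p h2

theorem le_getLast_of_pairwise {p : List Char} (hp : p.Pairwise (· ≤ ·)) (hne : p ≠ [])
    (x : Char) (hx : x ∈ p) : x ≤ p.getLast hne := by
  have := List.getLast?_eq_some_getLast hne
  induction p with
  | nil => simp at hx
  | cons a t ih =>
      cases t with
      | nil => simp at hx; simp [hx, List.getLast]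
      | cons b u =>
          rcases List.mem_cons.1 hx with rfl | hxt
          · have hlast : (b :: u).getLast (by simp) ∈ b :: u := List.getLast_mem _
            have := (List.pairwise_cons.1 hp).1 _ hlast
            simpa [List.getLast_cons] using this
          · have := ih (List.pairwise_cons.1 hp).2 (by simp) hxt (List.getLast?_eq_some_getLast (by simp))
            simpa [List.getLast_cons] using this

theorem drop_index_eq_filter (L : List Char) (hL : L.Pairwise (· < ·)) (m : Char) (k : Nat)
    (hk : PySem.List.index? L m = some k) :
    L.drop k = L.filter (fun d => decide (m ≤ d)) := by
  obtain ⟨pre, suf, hsplit, hlen, _⟩ := (PySem.List.index?_eq_some_iff _ _ _).1 hk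
  subst hsplit
  have hpair := List.pairwise_append.1 hL
  have hprem : ∀ a ∈ pre, ¬ (m ≤ a) := by
    intro a ha
    exact not_le.2 (hpair.2.2 a ha m (by simp))
  have hsufm : ∀ b ∈ suf, m ≤ b := by
    intro b hb
    exact le_of_lt ((List.pairwise_cons.1 hpair.2.1).1 b hb)
  rw [← hlen, List.drop_left, List.filter_append]
  rw [List.filter_eq_nil_iff.2 (by intro a ha; simpa using hprem a ha)]
  rw [List.filter_cons_of_pos (by simp), List.filter_eq_self.2 (by intro b hb; simpa using hsufm b hb)]
  simp

theorem foldl_congr' {α β : Type} (l : List α) (f g : β → α → β) (b : β)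
    (h : ∀ b' : β, ∀ a ∈ l, f b' a = g b' a) : l.foldl f b = l.foldl g b := by
  induction l generalizing b with
  | nil => rfl
  | cons x t ih => simp only [List.foldl_cons, h b x (by simp)]; exact ih _ (fun b' a ha => h b' a (List.mem_cons_of_mem _ ha))

theorem foldl_append_flatMap {α β : Type} (l : List α) (f : α → List β) (init : List β) :
    l.foldl (fun acc x => acc ++ f x) init = init ++ l.flatMap f := by
  induction l generalizing init with
  | nil => simp
  | cons x t ih => simp [ih, List.append_assoc]

theorem pyA_add_cwr (L : List Char) (hL : L.Pairwise (· < ·)) (n : Nat) (hn : 1 ≤ n) :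
    pyA_add_to_non_repeated_digits_list L (pyB_cwr L (n : Int))
      = pyB_cwr L ((n : Int) + 1) := by
  cases L with
  | nil =>
      rw [pyB_cwr_nil_pos _ (by omega), pyB_cwr_nil_pos _ (by omega)]
      simp [pyA_add_to_non_repeated_digits_list]
  | cons d rest =>
      have hne : pyB_cwr (d :: rest) (n : Int) ≠ [] := pyB_cwr_ne_nil _ _ (by simp)
      unfold pyA_add_to_non_repeated_digits_list
      rw [if_neg (by simp [hne])]
      rw [foldl_congr' _ _ (fun acc p => acc ++ extF (d :: rest) p) [] ?_]
      · rw [foldl_append_flatMap, List.nil_append, ← pyB_cwr_step n (d :: rest) hL]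
      · intro acc p hp
        have hpne : p ≠ [] := by
          intro hnil
          have := length_mem_pyB_cwr _ _ p hp
          rw [hnil] at this; simp at this; omega
        obtain ⟨m, hm⟩ : ∃ m, PySem.List.max? p (fun x => x) = some m := by
          cases hmx : PySem.List.max? p (fun x => x) with
          | none => exact absurd ((PySem.List.max?_eq_none_iff _ _).1 hmx) hpne
          | some m => exact ⟨m, rfl⟩
        have hmmem : m ∈ p := PySem.List.max?_mem hm
        have hmax : ∀ y ∈ p, y ≤ m := PySem.List.max?_isMax hm
        have hple : p.Pairwise (· ≤ ·) := pairwise_le_of_mem_pyB_cwr _ _ hL p hp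
        have hmlast : m = p.getLast hpne :=
          le_antisymm (le_getLast_of_pairwise hple hpne m hmmem)
            (hmax _ (List.getLast_mem hpne))
        have hmL : m ∈ d :: rest := mem_pyB_cwr_subset _ _ p hp m hmmem
        obtain ⟨k, hk⟩ : ∃ k, PySem.List.index? (d :: rest) m = some k := by
          cases hix : PySem.List.index? (d :: rest) m with
          | none => exact absurd hmL ((PySem.List.index?_eq_none_iff _ _).1 hix)
          | some k => exact ⟨k, rfl⟩
        simp only [hm, hk]
        rw [PySem.List.foldl_pyRange_pyGetD' (d :: rest) ' '
              (fun acc2 dd => acc2 ++ [p ++ [dd]]) acc (by positivity : (0:Int) ≤ (k:Int))]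
        rw [Int.toNat_natCast,
            PySem.List.foldl_append_singleton_eq_map (fun dd => p ++ [dd]) _ acc,
            drop_index_eq_filter (d :: rest) hL m k hk]
        have hlastm : p.getLast? = some m := by
          rw [List.getLast?_eq_some_getLast hpne, hmlast]
        unfold extF
        rw [hlastm]

theorem pyA_loop_cwr (L : List Char) (hL : L.Pairwise (· < ·)) (n : Nat) (hn : 1 ≤ n) :
    (PySem.List.pyRange 0 (n : Int) 1).foldl
      (fun P _ => pyA_add_to_non_repeated_digits_list L P) [] = pyB_cwr L (n : Int) := by
  induction n, hn using Nat.le_induction with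
  | base =>
      rw [show ((1:Nat):Int) = 0 + 1 by norm_num, PySem.List.pyRange_one_singleton]
      simp only [List.foldl_cons, List.foldl_nil]
      unfold pyA_add_to_non_repeated_digits_list
      rw [if_pos (by simp)]
      rw [PySem.List.foldl_append_singleton_eq_map (fun d => [d]) L []]
      rw [show ((0:Int) + 1) = ((1:Nat):Int) by norm_num, show ((1:Nat):Int) = (1:Int) by norm_num,
          pyB_cwr_one]
      simp
  | succ n hn ih =>
      rw [show ((n+1:Nat):Int) = (n:Int) + 1 by push_cast; ring,
          PySem.List.pyRange_one_succ_right (by positivity), List.foldl_append]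
      simp only [List.foldl_cons, List.foldl_nil]
      rw [ih, pyA_add_cwr L hL n hn]

theorem get_repeat_digit_candidate_list_spec : Claim_equal_get_repeat_digit_candidate_list := by
  unfold Claim_equal_get_repeat_digit_candidate_list
  intro length repeated_digits test_length _hdom hpre
  unfold Spec_get_repeat_digit_candidate_list
  unfold get_repeat_digit_candidate_list get_repeat_digit_candidate_list_alt
  unfold pyA_all_digits_minus_one_digit pyA_get_non_repeated_digits_list
  dsimp only
  have hpre' : test_length < length := hpre
  set S : PySem.Set Char :=
    PySem.Set.diff (PySem.Set.ofList ("1234567890".toList)) (PySem.Int.toChars repeated_digits)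
    with hS
  set L : List Char := PySem.List.sorted S (fun x => x) false with hLdef
  have hnd : S.Nodup := PySem.Set.nodup_diff _ _ (PySem.Set.nodup_ofList _)
  have hperm : L.Perm S := PySem.List.sorted_perm S (fun x => x) false
  have hndL : L.Nodup := hperm.nodup_iff.2 hnd
  have hle : L.Pairwise (· ≤ ·) := PySem.List.sorted_pairwise S (fun x => x)
  have hL : L.Pairwise (· < ·) :=
    (List.Pairwise.and hle hndL).imp (fun h => lt_of_le_of_ne h.1 h.2)
  set n : Nat := (length - test_length).toNat with hn
  have hn1 : 1 ≤ n := by omega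
  have hcast : length - test_length = (n : Int) := by omega
  rw [hcast, pyA_loop_cwr L hL n hn1]
  rw [PySem.List.foldl_append_singleton_eq_map
        (fun p => String.mk ((List.replicate test_length.toNat (PySem.Int.toChars repeated_digits)).flatten ++ p))
        (pyB_cwr L (n : Int)) []]
  simp
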